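-- pv_equiv track=rewrite | github.com/arachwal/prg-basics | 04-Functions/7.19.py | f
-- ===== SOURCE A (Python) =====
-- from collections import Counter
--
-- def f(number):
--     snumber=str(number)
--     counts=Counter(snumber)
--     sum=0
--     for digit in snumber:
--         if counts[digit]>1:
--             sum+=int(digit)
--     return sum
-- ===== SOURCE B (Python) =====
-- def f(number):
--     # Sort the digits, then scan runs of equal characters; add int(c)*runlength
--     # for every run longer than 1.
--     s = sorted(str(number))
--     total = 0
--     while s:
--         c = s[0]
--         k = 1
--         while k < len(s) and s[k] == c:
--             k += 1
--         if k > 1: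
--             total += int(c) * k
--         s = s[k:]
--     return total
-- ===== Notes on version B (the rewrite author's own statement) =====
-- stated objective: alternative
-- what changed: Replaced the Counter-based hash counting plus per-character loop with a sort-then-run-length scan: sort the characters of str(number) and add int(c)*k for each run of length k>1.
import Mathlib
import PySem

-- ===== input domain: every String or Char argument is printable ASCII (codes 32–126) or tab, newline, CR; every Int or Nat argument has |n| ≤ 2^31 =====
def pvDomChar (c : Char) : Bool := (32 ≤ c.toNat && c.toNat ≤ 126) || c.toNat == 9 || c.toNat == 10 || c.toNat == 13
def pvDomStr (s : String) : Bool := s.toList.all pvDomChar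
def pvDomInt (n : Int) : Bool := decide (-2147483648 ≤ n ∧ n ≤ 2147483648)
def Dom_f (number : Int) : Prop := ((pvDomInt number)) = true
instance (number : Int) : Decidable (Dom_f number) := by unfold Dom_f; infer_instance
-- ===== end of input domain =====

-- B sorts the characters of str(number) and adds int(c)*k for every run of k>1 equal
-- characters, replacing A's Counter + per-character loop (alternative decomposition).

-- int(digit) for a single character; exact here: both programs apply it only to
-- characters occurring more than once in str(number), which are decimal digits
-- ('-' occurs at most once), so the ValueError branch (none) is never reached.
def pyInt1 (c : Char) : Int := (PySem.Int.ofChars? [c]).getD 0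

-- ===== PORT A =====
def f (number : Int) : Int :=
  let snumber := PySem.Int.toChars number
  let counts := PySem.Dict.counter snumber
  snumber.foldl (fun sum digit => if 1 < counts.getD digit 0 then sum + pyInt1 digit else sum) 0

-- ===== PORT B =====
-- the outer while loop of Source B: peel the run of the head character, add its
-- contribution if longer than 1, continue on the rest
def runLoop : List Char → Int → Int
  | [], total => total
  | c :: rest, total =>
    let k : Int := (rest.takeWhile (· == c)).length + 1
    runLoop (rest.dropWhile (· == c))
      (if 1 < k then total + pyInt1 c * k else total)
termination_by l _ => l.length
decreasing_by
  simpa using Nat.lt_succ_of_le (List.length_dropWhile_le (· == c) rest)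

def f_alt (number : Int) : Int :=
  runLoop (PySem.List.sorted (PySem.Int.toChars number) (fun c => c) false) 0

-- ===== PRECONDITION & SPEC =====
def Spec_f (number : Int) (out : Int) : Prop := out = f_alt number
instance (number : Int) (out : Int) : Decidable (Spec_f number out) := by unfold Spec_f; infer_instance

-- ===== CLAIM (what is proved, stated in full; the proofs are below) =====
def Claim_equal_f : Prop := ∀ (number : Int), Dom_f number → Spec_f number (f number)

-- ===== LEMMAS AND PROOFS =====

-- canonical value: sum over l of pyInt1 c for every occurrence of a character
-- occurring more than once, with the count taken in m
def dupSum (m l : List Char) : Int :=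
  (l.map (fun c => if 1 < m.count c then pyInt1 c else 0)).sum

theorem foldl_guard_add (l : List Char) (p : Char → Prop) [DecidablePred p]
    (g : Char → Int) (a : Int) :
    l.foldl (fun acc x => if p x then acc + g x else acc) a
      = a + (l.map fun x => if p x then g x else 0).sum := by
  rw [PySem.List.foldl_ite_eq_foldl_filter, PySem.List.foldl_add]
  congr 1
  induction l with
  | nil => simp
  | cons h t ih => by_cases hp : p h <;> simp [hp, ih]

theorem f_eq_dupSum (number : Int) :
    f number = dupSum (PySem.Int.toChars number) (PySem.Int.toChars number) := by
  unfold f dupSum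
  simp only [PySem.Dict.getD_counter]
  rw [foldl_guard_add]
  simp only [zero_add]
  congr 1
  apply List.map_congr_left
  intro c _
  have h : (1 : Int) < ((PySem.Int.toChars number).count c : Int)
      ↔ 1 < (PySem.Int.toChars number).count c := by exact_mod_cast Iff.rfl
  simp [h]

theorem dupSum_perm {m m' l l' : List Char} (hm : m.Perm m') (hl : l.Perm l') :
    dupSum m l = dupSum m' l' := by
  unfold dupSum
  have h : ∀ c, m.count c = m'.count c := fun c => hm.count_eq c
  simp only [h]
  exact (hl.map _).sum_eq

theorem runLoop_eq : ∀ (l : List Char) (total : Int),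
    l.Pairwise (· ≤ ·) → runLoop l total = total + dupSum l l := by
  intro l total
  induction l, total using runLoop.induct with
  | case1 total => simp [runLoop, dupSum]
  | case2 c rest total k ih =>
    intro hs
    set t := rest.takeWhile (· == c) with ht
    set d := rest.dropWhile (· == c) with hd
    have hrest : rest = t ++ d := (List.takeWhile_append_dropWhile).symm
    have htc : ∀ x ∈ t, x = c := by
      intro x hx
      have := List.mem_takeWhile_imp hx
      simpa [beq_iff_eq] using this
    have hdne : ∀ x ∈ d, x ≠ c := by
      -- d is sorted, its elements are ≥ c, and its head is ≠ c, hence all ≠ c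
      have hpl : (c :: rest).Pairwise (· ≤ ·) := hs
      have hged : ∀ x ∈ d, c ≤ x := by
        intro x hx
        have hxr : x ∈ rest := by rw [hrest]; exact List.mem_append_right _ hx
        exact (List.pairwise_cons.mp hpl).1 x hxr
      have hpd : d.Pairwise (· ≤ ·) := by
        have : rest.Pairwise (· ≤ ·) := (List.pairwise_cons.mp hpl).2
        exact ((hrest ▸ this).sublist (List.sublist_append_right t d))
      intro x hx hxc
      cases hdd : d with
      | nil => simp [hdd] at hx
      | cons y ys =>
        have hyne : ¬ (y == c) = true := by
          have := List.head?_dropWhile_not (· == c) rest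
          rw [← hd, hdd] at this; simpa using this
        have hyne' : y ≠ c := by simpa [beq_iff_eq] using hyne
        have hyx : y ≤ x := by
          rw [hdd] at hx
          rcases List.mem_cons.mp hx with h | h
          · exact le_of_eq h.symm
          · exact (List.pairwise_cons.mp (hdd ▸ hpd)).1 x h
        have hcy : c ≤ y := hged y (by simp [hdd])
        exact hyne' (le_antisymm (hxc ▸ hyx) hcy)
    have hcountc : (c :: rest).count c = t.length + 1 := by
      rw [hrest]
      have h1 : t.count c = t.length := by
        rw [List.count_eq_length]
        intro x hx; simp [htc x hx]
      have h2 : d.count c = 0 := by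
        rw [List.count_eq_zero]
        intro hmem; exact (hdne c hmem) rfl
      simp [List.count_append, h1, h2]
    have hcountd : ∀ x ∈ d, (c :: rest).count x = d.count x := by
      intro x hx
      rw [hrest]
      have h1 : t.count x = 0 := by
        rw [List.count_eq_zero]
        intro hmem; exact (hdne x hx) (htc x hmem)
      have h2 : x ≠ c := hdne x hx
      simp [List.count_cons, List.count_append, h1]
      exact fun hcx => h2 hcx.symm
    have hpd : d.Pairwise (· ≤ ·) := by
      have : rest.Pairwise (· ≤ ·) := (List.pairwise_cons.mp hs).2
      exact ((hrest ▸ this).sublist (List.sublist_append_right t d))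
    -- split dupSum of the whole list into the head run and the tail
    have hsplit : dupSum (c :: rest) (c :: rest)
        = (if 1 < ((t.length : Int) + 1) then pyInt1 c * ((t.length : Int) + 1) else 0)
          + dupSum d d := by
      unfold dupSum
      rw [hrest]
      simp only [List.map_cons, List.map_append, List.sum_cons, List.sum_append]
      have hmt : t.map (fun x => if 1 < (c :: (t ++ d)).count x then pyInt1 x else 0)
          = t.map (fun _ => if 1 < (c :: (t ++ d)).count c then pyInt1 c else 0) := by
        apply List.map_congr_left
        intro x hx; rw [htc x hx]
      have hmd : d.map (fun x => if 1 < (c :: (t ++ d)).count x then pyInt1 x else 0)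
          = d.map (fun x => if 1 < d.count x then pyInt1 x else 0) := by
        apply List.map_congr_left
        intro x hx
        have := hcountd x hx
        rw [hrest] at this
        rw [this]
      rw [hmt, hmd]
      have hcnt : (c :: (t ++ d)).count c = t.length + 1 := by
        have := hcountc; rw [hrest] at this; exact this
      rw [hcnt]
      have hconst : (t.map (fun _ => if 1 < t.length + 1 then pyInt1 c else 0)).sum
          = (t.length : Int) * (if 1 < t.length + 1 then pyInt1 c else 0) := by
        rw [List.map_const']
        simp [List.sum_replicate]
      rw [hconst]
      split_ifs with h1 h2 h2
      · ring
      · exfalso; omega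
      · exfalso; omega
      · ring
    have ih' := ih hpd
    simp only [dite_eq_ite] at ih'
    have hk : k = (t.length : Int) + 1 := rfl
    rw [hk] at ih'
    rw [runLoop]
    simp only [← ht, ← hd]
    rw [ih', hsplit]
    by_cases hc : (1 : Int) < (t.length : Int) + 1
    · rw [if_pos hc, if_pos hc]; ring
    · rw [if_neg hc, if_neg hc]; ring

-- ===== VERDICT (by name: the statement is the Claim_ definition above) =====
theorem f_spec : Claim_equal_f := by
  intro number _
  unfold Spec_f f_alt
  rw [f_eq_dupSum]
  have hpw : (PySem.List.sorted (PySem.Int.toChars number) (fun c => c) false).Pairwise (· ≤ ·) := by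
    simpa using PySem.List.sorted_pairwise (xs := PySem.Int.toChars number) (key := fun (c : Char) => c)
  rw [runLoop_eq _ 0 hpw, zero_add]
  exact dupSum_perm (PySem.List.sorted_perm _ _ _).symm (PySem.List.sorted_perm _ _ _).symm
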